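-- pv_equiv track=rewrite | github.com/jylee840424-cell/smart-meeting-ai | smart-meeting-ai/frontend/pages/01_video_upload.py | get_workflow_html
-- ===== SOURCE A (Python) =====
-- def get_workflow_html(current_step):
--     steps = ["영상 등록", "음성 분석", "화자 분리", "구조화 요약 생성", "결정 검토 준비"]
--     html_parts = ['<div class="workflow-container">']
--     for i, label in enumerate(steps, 1):
--         if i < current_step:
--             box_cls, cir_txt, bdg_cls, bdg_txt = "completed active", "✓", "badge-completed", "완료"
--         elif i == current_step:
--             box_cls, cir_txt, bdg_cls, bdg_txt = "processing active", str(i), "badge-processing", "진행 중"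
--         else:
--             box_cls, cir_txt, bdg_cls, bdg_txt = "", str(i), "badge-pending", "대기"
--
--         raw_html = f'<div class="step-box {box_cls}"><div class="step-circle">{cir_txt}</div><div class="step-label">{label}</div><span class="badge {bdg_cls}">{bdg_txt}</span></div>'
--         html_parts.append("".join([line.strip() for line in raw_html.splitlines()]))
--     html_parts.append('</div>')
--     return "".join(html_parts)
-- ===== SOURCE B (Python) =====
-- def get_workflow_html(current_step):
--     steps = ["영상 등록", "음성 분석", "화자 분리", "구조화 요약 생성", "결정 검토 준비"]
--     n = len(steps)
--
--     def box(box_cls, cir_txt, bdg_cls, bdg_txt, label):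
--         return f'<div class="step-box {box_cls}"><div class="step-circle">{cir_txt}</div><div class="step-label">{label}</div><span class="badge {bdg_cls}">{bdg_txt}</span></div>'
--
--     c = max(0, min(n, current_step - 1))
--     parts = ['<div class="workflow-container">']
--     parts += [box("completed active", "✓", "badge-completed", "완료", lab) for lab in steps[:c]]
--     if 1 <= current_step <= n:
--         parts.append(box("processing active", str(current_step), "badge-processing", "진행 중", steps[current_step - 1]))
--     p = max(0, min(n, current_step))
--     parts += [box("", str(p + 1 + j), "badge-pending", "대기", lab) for j, lab in enumerate(steps[p:])]
--     parts.append('</div>')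
--     return "".join(parts)
-- ===== Notes on version B (the rewrite author's own statement) =====
-- stated objective: alternative
-- what changed: Instead of classifying each of the five labels inside one enumerate loop with a three-way branch, B computes the three contiguous groups (completed prefix, optional current step, pending suffix) by clamped slice arithmetic up front and emits each group with its own fixed template, dropping the per-item branch and the splitlines/strip pass.
import Mathlib
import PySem

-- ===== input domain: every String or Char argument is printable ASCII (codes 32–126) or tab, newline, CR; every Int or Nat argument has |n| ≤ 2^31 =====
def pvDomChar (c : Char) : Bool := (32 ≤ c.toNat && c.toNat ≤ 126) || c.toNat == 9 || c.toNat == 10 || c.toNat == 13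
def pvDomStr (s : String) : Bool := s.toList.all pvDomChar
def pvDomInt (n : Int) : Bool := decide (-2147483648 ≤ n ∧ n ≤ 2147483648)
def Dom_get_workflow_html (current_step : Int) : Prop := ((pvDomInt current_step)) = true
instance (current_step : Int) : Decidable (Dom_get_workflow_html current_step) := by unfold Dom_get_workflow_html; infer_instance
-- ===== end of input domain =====

set_option maxRecDepth 40000
set_option maxHeartbeats 1000000


-- B replaces A's per-label three-way branch inside one loop by three contiguous groups
-- (completed prefix / optional current box / pending suffix) computed by clamped slice
-- arithmetic; equivalence of return values is proved on the whole Int domain.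
-- ===== PORT A =====
def pvStepsA : List String := ["영상 등록", "음성 분석", "화자 분리", "구조화 요약 생성", "결정 검토 준비"]

def get_workflow_html (current_step : Int) : String :=
  let steps := pvStepsA
  let html_parts := ["<div class=\"workflow-container\">"]
  let html_parts := (PySem.List.enumerate steps 1).foldl (fun acc p =>
    let i := p.1
    let label := p.2
    let (box_cls, cir_txt, bdg_cls, bdg_txt) :=
      if i < current_step then ("completed active", "✓", "badge-completed", "완료")
      else if i = current_step then ("processing active", PySem.Int.toStr i, "badge-processing", "진행 중")
      else ("", PySem.Int.toStr i, "badge-pending", "대기")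
    let raw_html := "<div class=\"step-box " ++ box_cls ++ "\"><div class=\"step-circle\">" ++ cir_txt
      ++ "</div><div class=\"step-label\">" ++ label ++ "</div><span class=\"badge " ++ bdg_cls
      ++ "\">" ++ bdg_txt ++ "</span></div>"
    acc ++ [PySem.Str.join "" ((PySem.Str.splitlines raw_html).map PySem.Str.strip)]) html_parts
  let html_parts := html_parts ++ ["</div>"]
  PySem.Str.join "" html_parts

-- ===== PORT B =====
def pvStepsB : List String := ["영상 등록", "음성 분석", "화자 분리", "구조화 요약 생성", "결정 검토 준비"]

def pvBox (box_cls cir_txt bdg_cls bdg_txt label : String) : String :=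
  "<div class=\"step-box " ++ box_cls ++ "\"><div class=\"step-circle\">" ++ cir_txt
    ++ "</div><div class=\"step-label\">" ++ label ++ "</div><span class=\"badge " ++ bdg_cls
    ++ "\">" ++ bdg_txt ++ "</span></div>"

def get_workflow_html_alt (current_step : Int) : String :=
  let steps := pvStepsB
  let n : Int := 5
  let c := max 0 (min n (current_step - 1))
  let parts := ["<div class=\"workflow-container\">"]
  let parts := parts ++ (steps.take c.toNat).map
    (fun lab => pvBox "completed active" "✓" "badge-completed" "완료" lab)
  let parts := if 1 ≤ current_step ∧ current_step ≤ n then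
      parts ++ [pvBox "processing active" (PySem.Int.toStr current_step) "badge-processing" "진행 중"
        (steps.getD (current_step - 1).toNat "")]
    else parts
  let p := max 0 (min n current_step)
  let parts := parts ++ ((steps.drop p.toNat).zipIdx.map
    (fun q => pvBox "" (PySem.Int.toStr (p + 1 + (q.2 : Int))) "badge-pending" "대기" q.1))
  let parts := parts ++ ["</div>"]
  PySem.Str.join "" parts

-- ===== PRECONDITION & SPEC =====
def Spec_get_workflow_html (current_step : Int) (out : String) : Prop := out = get_workflow_html_alt current_step
instance (current_step : Int) (out : String) : Decidable (Spec_get_workflow_html current_step out) := by unfold Spec_get_workflow_html; infer_instance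

-- ===== CLAIM (what is proved, stated in full; the proofs are below) =====
def Claim_equal_get_workflow_html : Prop := ∀ (current_step : Int), Dom_get_workflow_html current_step → Spec_get_workflow_html current_step (get_workflow_html current_step)

-- ===== LEMMAS AND PROOFS =====

theorem pv_go_nb (isB : Char → Bool) (l cur : List Char) (acc : List (List Char))
    (h : ∀ c ∈ l, isB c = false ∧ c ≠ '\r') :
    PySem.Chars.splitlines.go isB l cur acc
      = (if (l.reverse ++ cur).isEmpty then acc.reverse else (((l.reverse ++ cur).reverse) :: acc).reverse) := by
  fun_induction PySem.Chars.splitlines.go isB l cur acc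
  case case1 => simp_all [List.isEmpty_iff]
  case case2 => simp_all [List.isEmpty_iff]
  case case3 => exact absurd (h '\r' (by simp)).2 (by simp)
  case case4 c rest cur acc hcr hb ih =>
    exact absurd hb (by simp [(h c (by simp)).1])
  case case5 c rest cur acc hcr hb ih =>
    rw [ih (fun x hx => h x (by simp [hx]))]
    simp

theorem pv_strip_id (l : List Char) (hh : l.head?.all (fun c => !PySem.Chars.isspace c) = true)
    (hl : l.getLast?.all (fun c => !PySem.Chars.isspace c) = true) :
    PySem.Chars.strip l = l := by
  unfold PySem.Chars.strip PySem.Chars.lstrip PySem.Chars.rstrip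
  cases l with
  | nil => simp
  | cons c rest =>
    simp at hh
    rw [List.dropWhile_cons_of_neg (by simp [hh])]
    rcases e : (c :: rest).getLast? with _ | d
    · simp at e
    · rw [e] at hl; simp at hl
      have : (c :: rest).reverse.head? = some d := by
        rw [List.head?_reverse, e]
      cases hrev : (c :: rest).reverse with
      | nil => simp at hrev
      | cons x xs =>
        rw [hrev] at this; simp at this; subst this
        rw [List.dropWhile_cons_of_neg (by simp [hl])]
        rw [← hrev, List.reverse_reverse]

def pvIsBreak (c : Char) : Bool :=
  decide (c.toNat = 10) || decide (c.toNat = 13) || decide (c.toNat = 11) || decide (c.toNat = 12) ||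
  decide (c.toNat = 28) || decide (c.toNat = 29) || decide (c.toNat = 30) || decide (c.toNat = 133) ||
  decide (c.toNat = 8232) || decide (c.toNat = 8233)

def pvOk (s : String) : Bool :=
  !s.toList.isEmpty && s.toList.all (fun c => !pvIsBreak c)
    && s.toList.head?.all (fun c => !PySem.Chars.isspace c)
    && s.toList.getLast?.all (fun c => !PySem.Chars.isspace c)

theorem pv_splitlines_nb (L : List Char) (hne : ¬L.isEmpty = true)
    (h : ∀ c ∈ L, pvIsBreak c = false) :
    PySem.Chars.splitlines L = [L] := by
  unfold PySem.Chars.splitlines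
  rw [pv_go_nb _ _ _ _ (fun c hc => ⟨by have := h c hc; simpa [pvIsBreak] using this, by
    intro e; subst e; have := h _ hc; simp [pvIsBreak] at this⟩)]
  simp_all [List.isEmpty_iff]

theorem pv_clean_lit (s : String) (h : pvOk s = true) :
    PySem.Str.join "" ((PySem.Str.splitlines s).map PySem.Str.strip) = s := by
  simp [pvOk, Bool.and_eq_true, List.all_eq_true] at h
  obtain ⟨⟨⟨hne, hnb⟩, hh⟩, hl⟩ := h
  have hsplit : PySem.Chars.splitlines s.toList = [s.toList] :=
    pv_splitlines_nb _ (by simpa using hne) (by intro c hc; simpa using hnb c hc)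
  have hmap : (PySem.Str.splitlines s).map String.toList = [s.toList] := by
    rw [PySem.Str.splitlines_map_toList, hsplit]
  obtain ⟨t, ht⟩ : ∃ t, PySem.Str.splitlines s = [t] := by
    cases h : PySem.Str.splitlines s <;> rw [h] at hmap <;> simp_all
  have ht2 : t.toList = s.toList := by rw [ht] at hmap; simpa using hmap
  rw [ht]
  simp only [List.map_cons, List.map_nil, PySem.Str.join, PySem.Chars.join]
  rw [PySem.Str.toList_strip, ht2,
    pv_strip_id _ (by simpa using hh) (by simpa using hl)]
  simp [List.intercalate]

theorem pvT1 : PySem.Int.toStr 1 = "1" := by decide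
theorem pvT2 : PySem.Int.toStr 2 = "2" := by decide
theorem pvT3 : PySem.Int.toStr 3 = "3" := by decide
theorem pvT4 : PySem.Int.toStr 4 = "4" := by decide
theorem pvT5 : PySem.Int.toStr 5 = "5" := by decide
theorem pv_case0 : get_workflow_html 0 = get_workflow_html_alt 0 := by
  simp [get_workflow_html, get_workflow_html_alt, pvStepsA, pvStepsB, pvBox,
    PySem.List.enumerate, pvT1, pvT2, pvT3, pvT4, pvT5, pv_clean_lit, pvOk, pvIsBreak,
    PySem.Chars.isspace]

theorem pv_case1 : get_workflow_html 1 = get_workflow_html_alt 1 := by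
  simp [get_workflow_html, get_workflow_html_alt, pvStepsA, pvStepsB, pvBox,
    PySem.List.enumerate, pvT1, pvT2, pvT3, pvT4, pvT5, pv_clean_lit, pvOk, pvIsBreak,
    PySem.Chars.isspace]

theorem pv_case2 : get_workflow_html 2 = get_workflow_html_alt 2 := by
  simp [get_workflow_html, get_workflow_html_alt, pvStepsA, pvStepsB, pvBox,
    PySem.List.enumerate, pvT1, pvT2, pvT3, pvT4, pvT5, pv_clean_lit, pvOk, pvIsBreak,
    PySem.Chars.isspace]

theorem pv_case3 : get_workflow_html 3 = get_workflow_html_alt 3 := by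
  simp [get_workflow_html, get_workflow_html_alt, pvStepsA, pvStepsB, pvBox,
    PySem.List.enumerate, pvT1, pvT2, pvT3, pvT4, pvT5, pv_clean_lit, pvOk, pvIsBreak,
    PySem.Chars.isspace]

theorem pv_case4 : get_workflow_html 4 = get_workflow_html_alt 4 := by
  simp [get_workflow_html, get_workflow_html_alt, pvStepsA, pvStepsB, pvBox,
    PySem.List.enumerate, pvT1, pvT2, pvT3, pvT4, pvT5, pv_clean_lit, pvOk, pvIsBreak,
    PySem.Chars.isspace]

theorem pv_case5 : get_workflow_html 5 = get_workflow_html_alt 5 := by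
  simp [get_workflow_html, get_workflow_html_alt, pvStepsA, pvStepsB, pvBox,
    PySem.List.enumerate, pvT1, pvT2, pvT3, pvT4, pvT5, pv_clean_lit, pvOk, pvIsBreak,
    PySem.Chars.isspace]

theorem pv_case6 : get_workflow_html 6 = get_workflow_html_alt 6 := by
  simp [get_workflow_html, get_workflow_html_alt, pvStepsA, pvStepsB, pvBox,
    PySem.List.enumerate, pvT1, pvT2, pvT3, pvT4, pvT5, pv_clean_lit, pvOk, pvIsBreak,
    PySem.Chars.isspace]

theorem pv_le0 (cs : Int) (h : cs ≤ 0) : get_workflow_html cs = get_workflow_html_alt cs := by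
  have l1 : ¬(1:Int) < cs := by omega
  have e1 : ¬(1:Int) = cs := by omega
  have l2 : ¬(2:Int) < cs := by omega
  have e2 : ¬(2:Int) = cs := by omega
  have l3 : ¬(3:Int) < cs := by omega
  have e3 : ¬(3:Int) = cs := by omega
  have l4 : ¬(4:Int) < cs := by omega
  have e4 : ¬(4:Int) = cs := by omega
  have l5 : ¬(5:Int) < cs := by omega
  have e5 : ¬(5:Int) = cs := by omega
  have e : get_workflow_html cs = get_workflow_html 0 := by
    simp [get_workflow_html, pvStepsA, PySem.List.enumerate,
      l1, e1, l2, e2, l3, e3, l4, e4, l5, e5]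
  have m1 : max 0 (min 5 (cs - 1)) = (0:Int) := by omega
  have m2 : max 0 (min 5 cs) = (0:Int) := by omega
  have g : ¬((1:Int) ≤ cs ∧ cs ≤ 5) := by omega
  have e' : get_workflow_html_alt cs = get_workflow_html_alt 0 := by
    simp [get_workflow_html_alt, pvStepsB, m1, m2, g]
  rw [e, e']; exact pv_case0

theorem pv_ge6 (cs : Int) (h : 6 ≤ cs) : get_workflow_html cs = get_workflow_html_alt cs := by
  have l1 : (1:Int) < cs := by omega
  have l2 : (2:Int) < cs := by omega
  have l3 : (3:Int) < cs := by omega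
  have l4 : (4:Int) < cs := by omega
  have l5 : (5:Int) < cs := by omega
  have e : get_workflow_html cs = get_workflow_html 6 := by
    simp [get_workflow_html, pvStepsA, PySem.List.enumerate, l1, l2, l3, l4, l5]
  have m1 : max 0 (min 5 (cs - 1)) = (5:Int) := by omega
  have m2 : max 0 (min 5 cs) = (5:Int) := by omega
  have g : ¬((1:Int) ≤ cs ∧ cs ≤ 5) := by omega
  have e' : get_workflow_html_alt cs = get_workflow_html_alt 6 := by
    simp [get_workflow_html_alt, pvStepsB, m1, m2, g]
  rw [e, e']; exact pv_case6

-- ===== VERDICT (by name: the statement is the Claim_ definition above) =====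
theorem get_workflow_html_spec : Claim_equal_get_workflow_html := by
  intro cs _
  unfold Spec_get_workflow_html
  rcases (by omega : cs ≤ 0 ∨ cs = 1 ∨ cs = 2 ∨ cs = 3 ∨ cs = 4 ∨ cs = 5 ∨ 6 ≤ cs) with
    h | h | h | h | h | h | h
  · exact pv_le0 cs h
  · subst h; exact pv_case1
  · subst h; exact pv_case2
  · subst h; exact pv_case3
  · subst h; exact pv_case4
  · subst h; exact pv_case5
  · exact pv_ge6 cs h
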